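-- pv_equiv track=rewrite | github.com/magenta1223/boj-archive | problems/1525번： 퍼즐/1525번： 퍼즐.py | idx2arr
-- ===== SOURCE A (Python) =====
-- from math import factorial
--
-- def idx2arr(idx):
--     arr = [[0] * 3 for _ in range(3)]
--     nums = list(range(9))
--     for i in range(9):
--         v, idx = divmod(idx, fcts[i])
--         x,y = divmod(i, 3)
--         arr[x][y] = nums[v]
--         del nums[v]
--     return arr
--
-- fcts = [factorial(i) for i in range(8,-1,-1)]
-- ===== SOURCE B (Python) =====
-- from math import factorial
--
-- fcts = [factorial(i) for i in range(8, -1, -1)]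
--
-- def idx2arr(idx):
--     grid = [[0, 0, 0], [0, 0, 0], [0, 0, 0]]
--     used = [False] * 9
--     for i in range(9):
--         # i-th factorial-base digit, taken directly from the original index
--         v = (idx // fcts[i]) % (9 - i)
--         # select the v-th still-unused number by a linear scan over the mask
--         j = 0
--         for u in used:
--             if not u:
--                 if v == 0:
--                     break
--                 v -= 1
--             j += 1
--         used[j] = True
--         grid[i // 3][i % 3] = j
--     return grid
-- ===== Notes on version B (the rewrite author's own statement) =====
-- stated objective: alternative
-- what changed: Replaces A's shrinking list with del (threading the remainder through divmod) by a fixed boolean used-mask: each factorial-base digit is computed in closed form from the original index as (idx // fcts[i]) % (9 - i), and the digit-th still-unused number is found by an inner linear scan over the mask instead of indexing-and-deleting from a list.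
import Mathlib
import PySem

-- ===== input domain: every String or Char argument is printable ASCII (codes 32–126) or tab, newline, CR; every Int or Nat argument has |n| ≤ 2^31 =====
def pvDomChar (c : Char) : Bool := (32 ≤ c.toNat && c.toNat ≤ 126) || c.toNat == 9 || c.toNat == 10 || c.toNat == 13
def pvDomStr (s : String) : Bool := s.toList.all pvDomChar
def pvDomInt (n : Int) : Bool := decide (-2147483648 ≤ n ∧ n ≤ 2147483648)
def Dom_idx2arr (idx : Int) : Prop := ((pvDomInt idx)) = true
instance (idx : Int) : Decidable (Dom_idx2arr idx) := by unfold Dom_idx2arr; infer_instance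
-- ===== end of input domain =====

-- B replaces A's shrinking list with `del` by a fixed boolean used-mask: each factorial-base
-- digit is computed in closed form from the original index and the digit-th unused number is
-- found by an inner linear scan (alternative decomposition, same cost on the fixed 3x3 grid).

-- fcts = [factorial(i) for i in range(8,-1,-1)]  (module constant, values written out)
def fcts : List Int := [40320, 5040, 720, 120, 24, 6, 2, 1, 1]

-- ===== PORT A =====
-- one iteration of A's `for i in range(9)` loop; `arr[x][y] = nums[v]; del nums[v]` is
-- ported with PySem.List.pop? (reads and deletes the element, none exactly where Python
-- raises IndexError); x = i/3, y = i%3 is divmod(i,3) (exact: i is a nonnegative loop index)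
def stepA (st : Option (List (List Int) × List Int × Int)) (i : Nat) :
    Option (List (List Int) × List Int × Int) :=
  match st with
  | none => none
  | some (arr, nums, idx) =>
    match PySem.Int.divmod? idx (fcts.getD i 0) with
    | none => none
    | some (v, idx') =>
      match PySem.List.pop? nums v with
      | none => none
      | some (num, nums') =>
        some (arr.set (i / 3) ((arr.getD (i / 3) []).set (i % 3) num), nums', idx')

def idx2arr (idx : Int) : List (List Int) :=
  match (List.range 9).foldl stepA
      (some (([[0, 0, 0], [0, 0, 0], [0, 0, 0]] : List (List Int)), PySem.List.pyRange 0 9 1, idx)) with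
  | some st => st.1
  | none => []  -- unreachable under Pre_ (Python raises IndexError there)

-- ===== PORT B =====
-- Source B's inner `for u in used` loop with counter j: walks the mask counting v down at unused
-- entries; returns the break position, or used.length when the loop falls through
def scanB (rest : List Bool) (v : Int) (j : Nat) : Nat :=
  match rest with
  | [] => j
  | u :: rs => if !u then (if v = 0 then j else scanB rs (v - 1) (j + 1)) else scanB rs v (j + 1)

-- one iteration of Source B's outer loop; `used[j] = True` is ported with PySem.List.pySet?
-- (none exactly where Python raises IndexError, i.e. when the scan fell through)
def stepB (idx : Int) (st : Option (List (List Int) × List Bool)) (i : Nat) :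
    Option (List (List Int) × List Bool) :=
  match st with
  | none => none
  | some (grid, used) =>
    let v := PySem.Int.mod (PySem.Int.floordiv idx (fcts.getD i 0)) (9 - (i : Int))
    let j := scanB used v 0
    match PySem.List.pySet? used (j : Int) true with
    | none => none
    | some used' =>
      some (grid.set (i / 3) ((grid.getD (i / 3) []).set (i % 3) (j : Int)), used')

def idx2arr_alt (idx : Int) : List (List Int) :=
  match (List.range 9).foldl (stepB idx)
      (some (([[0, 0, 0], [0, 0, 0], [0, 0, 0]] : List (List Int)), List.replicate 9 false)) with
  | some st => st.1
  | none => []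

-- ===== PRECONDITION & SPEC =====
-- exactly the inputs on which A returns: outside [-9!, 9!) the leading digit idx // 40320
-- falls outside the 9-element list and Python raises IndexError
def Pre_idx2arr (idx : Int) : Prop := -362880 ≤ idx ∧ idx < 362880
instance (idx : Int) : Decidable (Pre_idx2arr idx) := by unfold Pre_idx2arr; infer_instance
def pvWitness_idx2arr : Int := (100000)

def Spec_idx2arr (idx : Int) (out : List (List Int)) : Prop := out = idx2arr_alt idx
instance (idx : Int) (out : List (List Int)) : Decidable (Spec_idx2arr idx out) := by
  unfold Spec_idx2arr; infer_instance

-- ===== CLAIM (what is proved, stated in full; the proofs are below) =====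
def Claim_equal_idx2arr : Prop :=
  ∀ (idx : Int), Dom_idx2arr idx → Pre_idx2arr idx → Spec_idx2arr idx (idx2arr idx)

-- ===== LEMMAS AND PROOFS =====

-- indices (counted from base b) of the still-unused entries of the mask, in increasing order
def unusedIdx (rest : List Bool) (b : Nat) : List Nat :=
  match rest with
  | [] => []
  | u :: rs => if u then unusedIdx rs (b + 1) else b :: unusedIdx rs (b + 1)

-- the value A's shrinking list holds when the mask is `used` (invariant of the equivalence)
def numsOf (used : List Bool) : List Int := (unusedIdx used 0).map Int.ofNat

lemma mem_unusedIdx : ∀ (rest : List Bool) (b x : Nat), x ∈ unusedIdx rest b →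
    b ≤ x ∧ x - b < rest.length ∧ rest[x - b]? = some false := by
  intro rest
  induction rest with
  | nil => intro b x hx; simp [unusedIdx] at hx
  | cons u rs ih =>
    intro b x hx
    by_cases hu : u
    · subst hu
      simp only [unusedIdx] at hx
      obtain ⟨hb, hlen, hget⟩ := ih (b + 1) x hx
      refine ⟨by omega, by simp; omega, ?_⟩
      have hxb : x - b = (x - (b + 1)) + 1 := by omega
      rw [hxb, List.getElem?_cons_succ]
      exact hget
    · have hu' : u = false := by simpa using hu
      subst hu'
      simp only [unusedIdx, if_neg Bool.false_ne_true, List.mem_cons] at hx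
      rcases hx with hx | hx
      · subst hx; exact ⟨le_refl x, by simp, by simp⟩
      · obtain ⟨hb, hlen, hget⟩ := ih (b + 1) x hx
        refine ⟨by omega, by simp; omega, ?_⟩
        have hxb : x - b = (x - (b + 1)) + 1 := by omega
        rw [hxb, List.getElem?_cons_succ]
        exact hget

lemma nodup_unusedIdx : ∀ (rest : List Bool) (b : Nat), (unusedIdx rest b).Nodup := by
  intro rest
  induction rest with
  | nil => intro b; simp [unusedIdx]
  | cons u rs ih =>
    intro b
    by_cases hu : u
    · subst hu; simpa only [unusedIdx, if_pos rfl] using ih (b + 1)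
    · have hu' : u = false := by simpa using hu
      subst hu'
      simp only [unusedIdx, if_neg Bool.false_ne_true, List.nodup_cons]
      refine ⟨fun hmem => ?_, ih (b + 1)⟩
      have := (mem_unusedIdx rs (b + 1) b hmem).1
      omega

lemma scanB_getD : ∀ (rest : List Bool) (b : Nat) (v : Int), 0 ≤ v →
    v.toNat < (unusedIdx rest b).length → scanB rest v b = (unusedIdx rest b).getD v.toNat 0 := by
  intro rest
  induction rest with
  | nil => intro b v h0 hlt; simp [unusedIdx] at hlt
  | cons u rs ih =>
    intro b v h0 hlt
    by_cases hu : u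
    · subst hu
      simp only [unusedIdx] at hlt ⊢
      simpa only [scanB, Bool.not_true, Bool.false_eq_true, if_neg] using ih (b + 1) v h0 hlt
    · have hu' : u = false := by simpa using hu
      subst hu'
      simp only [unusedIdx, if_neg Bool.false_ne_true] at hlt ⊢
      by_cases hv : v = 0
      · subst hv; simp [scanB]
      · have h1 : (1 : Int) ≤ v := by omega
        have hlt' : (v - 1).toNat < (unusedIdx rs (b + 1)).length := by
          simp only [List.length_cons] at hlt; omega
        have hrec := ih (b + 1) (v - 1) (by omega) hlt'
        have hvt : v.toNat = (v - 1).toNat + 1 := by omega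
        rw [show scanB (false :: rs) v b = if v = 0 then b else scanB rs (v - 1) (b + 1) from rfl,
          if_neg hv, hrec, hvt, List.getD_cons_succ]

lemma unusedIdx_set : ∀ (rest : List Bool) (jj b : Nat), rest[jj]? = some false →
    unusedIdx (rest.set jj true) b = (unusedIdx rest b).erase (b + jj) := by
  intro rest
  induction rest with
  | nil => intro jj b h; simp at h
  | cons u rs ih =>
    intro jj b h
    cases jj with
    | zero =>
      have hu : u = false := by simpa using h
      subst hu
      simp [unusedIdx, List.set]
    | succ j' =>
      have h' : rs[j']? = some false := by simpa using h
      have hrw : b + 1 + j' = b + (j' + 1) := by omega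
      by_cases hu : u
      · subst hu
        simp only [List.set_cons_succ, unusedIdx, if_true]
        simp only [ih j' (b + 1) h', hrw]
      · have hu' : u = false := by simpa using hu
        subst hu'
        simp only [List.set_cons_succ, unusedIdx, if_neg Bool.false_ne_true]
        rw [ih j' (b + 1) h', hrw, List.erase_cons_tail (by simp)]

-- one common loop iteration: for an in-range nonnegative selection index v, A's pop at v and
-- B's mask scan select the same number j, and the invariant nums = numsOf used is preserved
lemma step_core (used : List Bool) (v : Int) (h0 : 0 ≤ v)
    (hlt : v.toNat < (unusedIdx used 0).length) :
    ∃ j : Nat, j < used.length ∧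
      scanB used v 0 = j ∧
      PySem.List.pop? (numsOf used) v = some ((j : Int), numsOf (used.set j true)) ∧
      (unusedIdx (used.set j true) 0).length + 1 = (unusedIdx used 0).length := by
  set u := unusedIdx used 0 with hu
  set p := v.toNat with hp
  set j := u[p]'hlt with hj
  have hmem : j ∈ u := List.getElem_mem hlt
  obtain ⟨-, hjlen, hjget⟩ := mem_unusedIdx used 0 j hmem
  simp only [Nat.sub_zero] at hjlen hjget
  have hscan : scanB used v 0 = j := by
    rw [scanB_getD used 0 v h0 hlt, ← hu, List.getD_eq_getElem u 0 hlt]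
  have hset : unusedIdx (used.set j true) 0 = u.erase j := by
    simpa using unusedIdx_set used j 0 hjget
  have herase : u.erase j = u.eraseIdx p :=
    (nodup_unusedIdx used 0).erase_getElem p hlt
  have hplen : p < (numsOf used).length := by simpa [numsOf, ← hu] using hlt
  have hvp : v = (p : Int) := (Int.toNat_of_nonneg h0).symm
  have hnm : numsOf used = u.map Int.ofNat := by rw [numsOf, hu]
  have hpop : PySem.List.pop? (numsOf used) v = some ((j : Int), numsOf (used.set j true)) := by
    rw [hvp, PySem.List.pop?_natCast _ p hplen]
    have h1 : (numsOf used)[p]'hplen = (j : Int) := by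
      simp only [hnm, List.getElem_map]
      rfl
    have h2 : (numsOf used).eraseIdx p = numsOf (used.set j true) := by
      rw [hnm, List.eraseIdx_map, ← herase, ← hset, numsOf]
    rw [h1, h2]
  refine ⟨j, hjlen, hscan, hpop, ?_⟩
  rw [hset, List.length_erase_of_mem hmem]
  omega

-- factorial-base digit extraction commutes with taking the remainder: B reads its digit from
-- the original index, A from the running remainder
lemma digit_eq (a f k : Int) (hf : 0 < f) (hk : 0 < k) : a % (k * f) / f = a / f % k := by
  have hkf : 0 < k * f := mul_pos hk hf
  have h1 : a % (k * f) = a + (-(k * (a / (k * f)))) * f := by rw [Int.emod_def]; ring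
  have h2 : a % (k * f) / f = a / f + (-(k * (a / (k * f)))) := by
    rw [h1, Int.add_mul_ediv_right _ _ (ne_of_gt hf)]
  have hb0 : 0 ≤ a % (k * f) := Int.emod_nonneg a (ne_of_gt hkf)
  have hblt : a % (k * f) < k * f := Int.emod_lt_of_pos a hkf
  have hq0 : 0 ≤ a % (k * f) / f := Int.ediv_nonneg hb0 (le_of_lt hf)
  have hqlt : a % (k * f) / f < k := by rw [Int.ediv_lt_iff_lt_mul hf]; exact hblt
  have h3 : a / f = a % (k * f) / f + k * (a / (k * f)) := by linarith [h2]
  have h4 : (a % (k * f) / f + k * (a / (k * f))) % k = a % (k * f) / f % k :=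
    Int.add_mul_emod_self_left (a % (k * f) / f) k (a / (k * f))
  rw [← h3] at h4
  rw [Int.emod_eq_of_lt hq0 hqlt] at h4
  exact h4.symm

lemma fcts_pos (i : Nat) (h : i ≤ 8) : 0 < fcts.getD i 0 := by
  interval_cases i <;> norm_num [fcts]

lemma fcts_rec (i : Nat) (h1 : 1 ≤ i) (h2 : i ≤ 8) :
    fcts.getD (i - 1) 0 = (9 - (i : Int)) * fcts.getD i 0 := by
  interval_cases i <;> norm_num [fcts]

lemma stepA_step (arr : List (List Int)) (nums : List Int) (ix : Int) (i : Nat) (d : Int)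
    (hd : fcts.getD i 0 = d) (hne : d ≠ 0) (num : Int) (nums' : List Int)
    (hpop : PySem.List.pop? nums (PySem.Int.floordiv ix d) = some (num, nums')) :
    stepA (some (arr, nums, ix)) i =
      some (arr.set (i / 3) ((arr.getD (i / 3) []).set (i % 3) num), nums',
        PySem.Int.mod ix d) := by
  subst hd
  simp only [stepA, PySem.Int.divmod?, if_neg hne]
  rw [show ix.fdiv (fcts.getD i 0) = PySem.Int.floordiv ix (fcts.getD i 0) from rfl, hpop,
    show ix.fmod (fcts.getD i 0) = PySem.Int.mod ix (fcts.getD i 0) from rfl]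

lemma stepB_step (idx0 : Int) (grid : List (List Int)) (used : List Bool) (i : Nat)
    (v : Int) (hv : PySem.Int.mod (PySem.Int.floordiv idx0 (fcts.getD i 0)) (9 - (i : Int)) = v)
    (j : Nat) (hscan : scanB used v 0 = j) (hj : j < used.length) :
    stepB idx0 (some (grid, used)) i =
      some (grid.set (i / 3) ((grid.getD (i / 3) []).set (i % 3) (j : Int)), used.set j true) := by
  simp only [stepB, hv, hscan, PySem.List.pySet?_natCast used j true hj]

-- step 0 is where A's negative-index wraparound appears: for each of the 18 possible leading
-- digits q = idx // 40320 ∈ [-9, 8], A pops the same number that B's scan (digit q mod 9) selects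
lemma step0_core (q : Int) (h1 : -9 ≤ q) (h2 : q ≤ 8) :
    ∃ (j : Nat) (used1 : List Bool),
      used1 = (List.replicate 9 false).set j true ∧
      used1.length = 9 ∧ (unusedIdx used1 0).length = 8 ∧
      PySem.List.pop? (PySem.List.pyRange 0 9 1) q = some ((j : Int), numsOf used1) ∧
      scanB (List.replicate 9 false) (PySem.Int.mod q 9) 0 = j ∧
      j < (List.replicate 9 false).length := by
  interval_cases q
  · exact ⟨0, [true, false, false, false, false, false, false, false, false], by decide, by decide, by decide, by decide, by decide, by decide⟩
  · exact ⟨1, [false, true, false, false, false, false, false, false, false], by decide, by decide, by decide, by decide, by decide, by decide⟩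
  · exact ⟨2, [false, false, true, false, false, false, false, false, false], by decide, by decide, by decide, by decide, by decide, by decide⟩
  · exact ⟨3, [false, false, false, true, false, false, false, false, false], by decide, by decide, by decide, by decide, by decide, by decide⟩
  · exact ⟨4, [false, false, false, false, true, false, false, false, false], by decide, by decide, by decide, by decide, by decide, by decide⟩
  · exact ⟨5, [false, false, false, false, false, true, false, false, false], by decide, by decide, by decide, by decide, by decide, by decide⟩
  · exact ⟨6, [false, false, false, false, false, false, true, false, false], by decide, by decide, by decide, by decide, by decide, by decide⟩
  · exact ⟨7, [false, false, false, false, false, false, false, true, false], by decide, by decide, by decide, by decide, by decide, by decide⟩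
  · exact ⟨8, [false, false, false, false, false, false, false, false, true], by decide, by decide, by decide, by decide, by decide, by decide⟩
  · exact ⟨0, [true, false, false, false, false, false, false, false, false], by decide, by decide, by decide, by decide, by decide, by decide⟩
  · exact ⟨1, [false, true, false, false, false, false, false, false, false], by decide, by decide, by decide, by decide, by decide, by decide⟩
  · exact ⟨2, [false, false, true, false, false, false, false, false, false], by decide, by decide, by decide, by decide, by decide, by decide⟩
  · exact ⟨3, [false, false, false, true, false, false, false, false, false], by decide, by decide, by decide, by decide, by decide, by decide⟩
  · exact ⟨4, [false, false, false, false, true, false, false, false, false], by decide, by decide, by decide, by decide, by decide, by decide⟩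
  · exact ⟨5, [false, false, false, false, false, true, false, false, false], by decide, by decide, by decide, by decide, by decide, by decide⟩
  · exact ⟨6, [false, false, false, false, false, false, true, false, false], by decide, by decide, by decide, by decide, by decide, by decide⟩
  · exact ⟨7, [false, false, false, false, false, false, false, true, false], by decide, by decide, by decide, by decide, by decide, by decide⟩
  · exact ⟨8, [false, false, false, false, false, false, false, false, true], by decide, by decide, by decide, by decide, by decide, by decide⟩

-- steps 1..8: the remainders are nonnegative, A's index never wraps, and both loops keep
-- identical grids while nums = numsOf used
lemma loop_eq : ∀ (n i : Nat), i + n = 9 → 1 ≤ i →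
    ∀ (idx0 idxA : Int) (arr : List (List Int)) (used : List Bool),
      used.length = 9 → (unusedIdx used 0).length = n →
      idxA = PySem.Int.mod idx0 (fcts.getD (i - 1) 0) →
      ∃ r s, (List.range' i n).foldl stepA (some (arr, numsOf used, idxA)) = some r ∧
             (List.range' i n).foldl (stepB idx0) (some (arr, used)) = some s ∧
             r.1 = s.1 := by
  intro n
  induction n with
  | zero =>
    intro i _ _ idx0 idxA arr used _ _ _
    exact ⟨(arr, numsOf used, idxA), (arr, used), rfl, rfl, rfl⟩
  | succ n ih =>
    intro i h9 h1 idx0 idxA arr used hulen hcount hidx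
    have hi8 : i ≤ 8 := by omega
    have hf : 0 < fcts.getD i 0 := fcts_pos i hi8
    have hiI : (i : Int) ≤ 8 := by exact_mod_cast hi8
    have hk : (0 : Int) < 9 - (i : Int) := by omega
    have hK : fcts.getD (i - 1) 0 = (9 - (i : Int)) * fcts.getD i 0 := fcts_rec i h1 hi8
    set f := fcts.getD i 0 with hfdef
    have hkf : (0 : Int) < (9 - (i : Int)) * f := mul_pos hk hf
    have hAeq : idxA = idx0 % ((9 - (i : Int)) * f) := by
      rw [hidx, hK, PySem.Int.mod_eq_emod_of_pos hkf]
    have hA0 : 0 ≤ idxA := hAeq ▸ Int.emod_nonneg idx0 (ne_of_gt hkf)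
    have hAlt : idxA < (9 - (i : Int)) * f := hAeq ▸ Int.emod_lt_of_pos idx0 hkf
    set vA := PySem.Int.floordiv idxA f with hvadef
    have hva : vA = idxA / f := PySem.Int.floordiv_eq_ediv_of_pos hf
    have hva0 : 0 ≤ vA := by rw [hva]; exact Int.ediv_nonneg hA0 (le_of_lt hf)
    have hvalt : vA < 9 - (i : Int) := by rw [hva, Int.ediv_lt_iff_lt_mul hf]; exact hAlt
    have hvB : PySem.Int.mod (PySem.Int.floordiv idx0 f) (9 - (i : Int)) = vA := by
      rw [PySem.Int.mod_eq_emod_of_pos hk, PySem.Int.floordiv_eq_ediv_of_pos hf, hva, hAeq,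
        digit_eq idx0 f _ hf hk]
    have hnine : (9 : Int) - (i : Int) = ((n : Int) + 1) := by
      have : i + (n + 1) = 9 := h9
      omega
    have hlt' : vA.toNat < (unusedIdx used 0).length := by
      rw [hcount]
      omega
    obtain ⟨j, hjlen, hscan, hpop, hlen'⟩ := step_core used vA hva0 hlt'
    rw [List.range'_succ]
    simp only [List.foldl_cons]
    rw [stepA_step arr (numsOf used) idxA i f rfl (ne_of_gt hf) _ _ hpop]
    rw [stepB_step idx0 arr used i vA hvB j hscan (by omega)]
    have hidx' : PySem.Int.mod idxA f = PySem.Int.mod idx0 (fcts.getD ((i + 1) - 1) 0) := by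
      simp only [Nat.add_sub_cancel, ← hfdef]
      rw [PySem.Int.mod_eq_emod_of_pos hf, PySem.Int.mod_eq_emod_of_pos hf, hAeq,
        Int.emod_emod_of_dvd idx0 (dvd_mul_left f (9 - (i : Int)))]
    exact ih (i + 1) (by omega) (by omega) idx0 (PySem.Int.mod idxA f)
      (arr.set (i / 3) ((arr.getD (i / 3) []).set (i % 3) (j : Int)))
      (used.set j true) (by simpa using hulen) (by omega) hidx'

lemma pre_main (idx : Int) (h : Pre_idx2arr idx) : idx2arr idx = idx2arr_alt idx := by
  obtain ⟨h1, h2⟩ := h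
  have hq1 : -9 ≤ PySem.Int.floordiv idx 40320 := by
    rw [PySem.Int.floordiv_eq_ediv_of_pos (by norm_num)]; omega
  have hq2 : PySem.Int.floordiv idx 40320 ≤ 8 := by
    rw [PySem.Int.floordiv_eq_ediv_of_pos (by norm_num)]; omega
  obtain ⟨j, used1, hused1, h9, h8, hpop0, hscan0, hj9⟩ := step0_core _ hq1 hq2
  unfold idx2arr idx2arr_alt
  rw [show List.range 9 = 0 :: List.range' 1 8 from by decide]
  simp only [List.foldl_cons]
  rw [stepA_step _ _ _ 0 40320 rfl (by norm_num) _ _ hpop0]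
  rw [stepB_step idx _ _ 0 (PySem.Int.mod (PySem.Int.floordiv idx 40320) 9)
    (by norm_num [fcts]) j hscan0 (by simpa using hj9)]
  rw [← hused1]
  obtain ⟨r, s, hr, hs, hrs⟩ := loop_eq 8 1 (by norm_num) (by norm_num) idx
    (PySem.Int.mod idx 40320)
    (([[0, 0, 0], [0, 0, 0], [0, 0, 0]] : List (List Int)).set (0 / 3)
      ((([[0, 0, 0], [0, 0, 0], [0, 0, 0]] : List (List Int)).getD (0 / 3) []).set (0 % 3) (j : Int)))
    used1 h9 h8 rfl
  rw [hr, hs]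
  exact hrs

-- ===== VERDICT (by name: the statement is the Claim_ definition above) =====
theorem idx2arr_spec : Claim_equal_idx2arr := by
  intro idx _ hpre
  exact pre_main idx hpre
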